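-- pv_equiv track=rewrite | github.com/m3xan/Calc_gross_error | functions/excel/excel.py | different_dict
-- ===== SOURCE A (Python) =====
-- def different_dict(dict1, dict2):
--     """
--     Заглушка
--     """
--     differences = {}
--
--     # Перебираем ключи первого словаря
--     for key in dict1.keys():
--         if key not in dict2 or dict1[key] != dict2[key]:
--             differences[key] = dict1[key]
--
--     # Перебираем ключи второго словаря
--     for key in dict2.keys():
--         if key not in dict1:
--             differences[key] = dict2[key]
--
--     return differences
-- ===== SOURCE B (Python) =====
-- def different_dict(dict1, dict2):
--     merged = {**dict1, **dict2, **dict1}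
--     return {k: v for k, v in merged.items() if dict1.get(k) != dict2.get(k)}
-- ===== Notes on version B (the rewrite author's own statement) =====
-- stated objective: alternative
-- what changed: B replaces A's two guarded insert-loops with a union-then-filter algorithm: it first builds the merged dict {**dict1, **dict2, **dict1} (dict1-order keys then dict2-only keys, with dict1's value winning for common keys) and then keeps exactly the keys where dict1.get(k) != dict2.get(k), one uniform condition instead of A's two different per-loop guards.
import Mathlib
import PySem

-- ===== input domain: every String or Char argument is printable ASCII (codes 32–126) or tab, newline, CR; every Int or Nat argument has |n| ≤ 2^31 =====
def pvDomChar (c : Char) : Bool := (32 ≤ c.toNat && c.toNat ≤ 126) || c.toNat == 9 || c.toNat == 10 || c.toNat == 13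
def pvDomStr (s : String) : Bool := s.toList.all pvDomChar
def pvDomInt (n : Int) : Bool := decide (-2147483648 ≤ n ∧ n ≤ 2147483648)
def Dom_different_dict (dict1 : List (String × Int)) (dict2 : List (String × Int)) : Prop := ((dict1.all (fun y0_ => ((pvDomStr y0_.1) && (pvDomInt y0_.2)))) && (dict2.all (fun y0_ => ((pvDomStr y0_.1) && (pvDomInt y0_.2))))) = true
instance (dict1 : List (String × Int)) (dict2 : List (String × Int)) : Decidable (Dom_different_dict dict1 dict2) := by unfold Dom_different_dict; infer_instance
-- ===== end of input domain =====

-- B computes the result as a union-then-filter: build {**dict1, **dict2, **dict1} and keep the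
-- keys where dict1.get(k) != dict2.get(k) — an alternative decomposition, not claimed faster.

-- ===== PORT A =====
-- A receives Python dicts; the assoc-list arguments become dicts exactly as Python's dict(pairs) does.
def different_dict (dict1 : List (String × Int)) (dict2 : List (String × Int)) : List (String × Int) :=
  let d1 : PySem.Dict String Int := PySem.Dict.ofList dict1
  let d2 : PySem.Dict String Int := PySem.Dict.ofList dict2
  -- differences = {}; for key in dict1.keys(): if key not in dict2 or dict1[key] != dict2[key]: differences[key] = dict1[key]
  let differences1 : PySem.Dict String Int :=
    d1.keys.foldl (fun acc k =>
      if !(d2.contains k) || !(d1.getD k 0 == d2.getD k 0) then acc.insert k (d1.getD k 0) else acc)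
      PySem.Dict.empty
  -- for key in dict2.keys(): if key not in dict1: differences[key] = dict2[key]
  let differences : PySem.Dict String Int :=
    d2.keys.foldl (fun acc k =>
      if !(d1.contains k) then acc.insert k (d2.getD k 0) else acc) differences1
  differences.items

-- ===== PORT B =====
def different_dict_alt (dict1 : List (String × Int)) (dict2 : List (String × Int)) : List (String × Int) :=
  let d1 : PySem.Dict String Int := PySem.Dict.ofList dict1
  let d2 : PySem.Dict String Int := PySem.Dict.ofList dict2
  -- merged = {**dict1, **dict2, **dict1}   (insert dict1's items, then dict2's, then dict1's again)
  let merged : PySem.Dict String Int := PySem.Dict.ofList (d1.items ++ d2.items ++ d1.items)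
  -- return {k: v for k, v in merged.items() if dict1.get(k) != dict2.get(k)}
  (PySem.Dict.ofList (merged.items.filter (fun p => !(d1.get? p.1 == d2.get? p.1)))).items

-- ===== PRECONDITION & SPEC =====
def Spec_different_dict (dict1 : List (String × Int)) (dict2 : List (String × Int)) (out : List (String × Int)) : Prop := out = different_dict_alt dict1 dict2
instance (dict1 : List (String × Int)) (dict2 : List (String × Int)) (out : List (String × Int)) : Decidable (Spec_different_dict dict1 dict2 out) := by unfold Spec_different_dict; infer_instance

-- ===== CLAIM (what is proved, stated in full; the proofs are below) =====
def Claim_equal_different_dict : Prop := ∀ (dict1 : List (String × Int)) (dict2 : List (String × Int)), Dom_different_dict dict1 dict2 → Spec_different_dict dict1 dict2 (different_dict dict1 dict2)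

-- ===== LEMMAS AND PROOFS =====

-- first-match association lookup, the proof-side model of overwriting inserts from a nodup-keyed list
def lk : List (String × Int) → String → Option Int
  | [], _ => none
  | (k, v) :: rest, x => if k = x then some v else lk rest x

theorem lk_eq_none (l : List (String × Int)) (x : String) :
    x ∉ l.map Prod.fst → lk l x = none := by
  induction l with
  | nil => intro _; rfl
  | cons p l ih =>
    intro h
    obtain ⟨k, v⟩ := p
    simp only [List.map_cons, List.mem_cons, not_or] at h
    exact (if_neg (Ne.symm h.1)).trans (ih h.2)

theorem lk_of_mem (l : List (String × Int)) (k : String) (v : Int) :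
    (l.map Prod.fst).Nodup → (k, v) ∈ l → lk l k = some v := by
  induction l with
  | nil => intro _ h; cases h
  | cons p l ih =>
    intro hnd h
    obtain ⟨a, b⟩ := p
    rcases List.mem_cons.mp h with he | hm
    · obtain ⟨rfl, rfl⟩ := Prod.mk.injEq .. ▸ he
      exact if_pos rfl
    · have hk : k ∈ l.map Prod.fst := List.mem_map.mpr ⟨(k, v), hm, rfl⟩
      have hne : a ≠ k := by
        intro hq; subst hq
        exact (List.nodup_cons.mp (by simpa using hnd)).1 hk
      exact (if_neg hne).trans (ih (by simpa using hnd.of_cons) hm)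

-- a key of a dict's items list is contained
theorem contains_of_mem_items (d : PySem.Dict String Int) (p : String × Int)
    (h : p ∈ d.items) : d.contains p.1 = true := by
  rw [PySem.Dict.contains_eq_decide_mem_keys]
  exact decide_eq_true (PySem.Dict.mem_keys_of_mem_items d h)

-- items of a foldl of overwriting inserts from a list with distinct keys:
-- existing keys get their last l-value in place, new keys append in l-order
theorem items_foldl_insert_lk (l : List (String × Int)) (d : PySem.Dict String Int)
    (hnd : (l.map Prod.fst).Nodup) :
    (l.foldl (fun d p => d.insert p.1 p.2) d).items
      = d.items.map (fun p => match lk l p.1 with | some v => (p.1, v) | none => p)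
        ++ l.filter (fun p => !(d.contains p.1)) := by
  induction l generalizing d with
  | nil => simp [lk]
  | cons q l ih =>
    cases q with
    | mk k v =>
      have hk_nin : k ∉ l.map Prod.fst := (List.nodup_cons.mp (by simpa using hnd)).1
      have hnd' : (l.map Prod.fst).Nodup := by simpa using hnd.of_cons
      have hlkk : lk l k = none := lk_eq_none l k hk_nin
      simp only [List.foldl_cons]
      rw [ih (d.insert k v) hnd']
      by_cases hc : d.contains k = true
      · rw [PySem.Dict.items_insert_of_contains _ _ hc]
        rw [List.map_map]
        congr 1
        · apply List.map_congr_left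
          intro p _
          by_cases hpk : p.1 = k
          · simp only [Function.comp, hpk, beq_self_eq_true, if_pos, lk]
            simp [hlkk]
          · have : (p.1 == k) = false := beq_eq_false_iff_ne.mpr hpk
            simp only [Function.comp, this, Bool.false_eq_true, if_false]
            simp [lk, Ne.symm hpk]
        · rw [List.filter_cons]
          simp only [hc, Bool.not_true, Bool.false_eq_true, if_false]
          apply List.filter_congr
          intro p hp
          have hpk : p.1 ≠ k := by
            intro he
            exact hk_nin (he ▸ List.mem_map.mpr ⟨p, hp, rfl⟩)
          rw [PySem.Dict.contains_insert]
          simp [beq_eq_false_iff_ne.mpr hpk]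
      · have hcf : d.contains k = false := by simpa using hc
        rw [PySem.Dict.items_insert_of_not_contains _ _ hcf]
        rw [List.map_append, List.filter_cons]
        simp only [hcf, Bool.not_false, if_pos]
        have hmap : d.items.map (fun p => match lk l p.1 with | some v => (p.1, v) | none => p)
            = d.items.map (fun p => match lk ((k, v) :: l) p.1 with | some v => (p.1, v) | none => p) := by
          apply List.map_congr_left
          intro p hp
          have hpk : p.1 ≠ k := by
            intro he
            rw [← he] at hcf
            rw [contains_of_mem_items d p hp] at hcf
            exact Bool.true_eq_false.mp hcf
          simp [lk, Ne.symm hpk]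
        have hflt : l.filter (fun p => !((d.insert k v).contains p.1))
            = l.filter (fun p => !(d.contains p.1)) := by
          apply List.filter_congr
          intro p hp
          have hpk : p.1 ≠ k := by
            intro he
            exact hk_nin (he ▸ List.mem_map.mpr ⟨p, hp, rfl⟩)
          rw [PySem.Dict.contains_insert]
          simp [beq_eq_false_iff_ne.mpr hpk]
        rw [hmap, hflt]
        simp [lk, hlkk, List.append_assoc]

-- A's loop shape: a conditional insert over distinct keys, fresh whenever the condition fires, appends.
theorem items_foldl_cond_insert (ks : List String) (c : String → Bool) (v : String → Int)
    (d : PySem.Dict String Int) (hnd : ks.Nodup)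
    (hf : ∀ k ∈ ks, c k = true → d.contains k = false) :
    (ks.foldl (fun acc k => if c k then acc.insert k (v k) else acc) d).items
      = d.items ++ (ks.filter c).map (fun k => (k, v k)) := by
  induction ks generalizing d with
  | nil => simp
  | cons k ks ih =>
    simp only [List.foldl_cons, List.filter_cons]
    by_cases hc : c k = true
    · rw [if_pos hc, if_pos hc]
      have hfresh := hf k (List.mem_cons_self ..) hc
      rw [ih (d.insert k (v k)) hnd.of_cons ?_,
          PySem.Dict.items_insert_of_not_contains _ _ hfresh]
      · simp
      · intro k' hk' hck'
        rw [PySem.Dict.contains_insert]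
        have hne : k' ≠ k := fun h => (List.nodup_cons.mp hnd).1 (h ▸ hk')
        simp [hne, hf k' (List.mem_cons_of_mem _ hk') hck']
    · rw [if_neg hc, if_neg hc]
      exact ih d hnd.of_cons (fun k' hk' hck' => hf k' (List.mem_cons_of_mem _ hk') hck')

-- a key outside the iterated key list stays absent through A's conditional-insert loop
theorem contains_foldl_cond_insert (ks : List String) (c : String → Bool) (v : String → Int)
    (d : PySem.Dict String Int) (k : String) (hk_d : d.contains k = false) (hk_ks : k ∉ ks) :
    (ks.foldl (fun acc k' => if c k' then acc.insert k' (v k') else acc) d).contains k = false := by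
  induction ks generalizing d with
  | nil => simpa using hk_d
  | cons a ks ih =>
    have hka : k ≠ a := fun h => hk_ks (h ▸ List.mem_cons_self ..)
    have hk_ks' : k ∉ ks := fun h => hk_ks (List.mem_cons_of_mem _ h)
    simp only [List.foldl_cons]
    by_cases hc : c a = true
    · rw [if_pos hc]
      refine ih (d.insert a (v a)) ?_ hk_ks'
      rw [PySem.Dict.contains_insert]
      simp [hka, hk_d]
    · rw [if_neg hc]; exact ih d hk_d hk_ks'

-- ===== VERDICT (by name: the statement is the Claim_ definition above) =====
theorem different_dict_spec : Claim_equal_different_dict := by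
  unfold Claim_equal_different_dict
  intro dict1 dict2 _
  unfold Spec_different_dict different_dict different_dict_alt
  dsimp only
  set d1 : PySem.Dict String Int := PySem.Dict.ofList dict1 with hd1
  set d2 : PySem.Dict String Int := PySem.Dict.ofList dict2 with hd2
  have hnd1 : d1.keys.Nodup := PySem.Dict.nodup_keys_ofList dict1
  have hnd2 : d2.keys.Nodup := PySem.Dict.nodup_keys_ofList dict2
  have hnd1' : (d1.items.map Prod.fst).Nodup := hnd1
  have hnd2' : (d2.items.map Prod.fst).Nodup := hnd2
  -- ---- A's side: both loops append ----
  have hA1 : (d1.keys.foldl (fun acc k =>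
        if !(d2.contains k) || !(d1.getD k 0 == d2.getD k 0) then acc.insert k (d1.getD k 0) else acc)
        PySem.Dict.empty).items
      = (d1.keys.filter (fun k => !(d2.contains k) || !(d1.getD k 0 == d2.getD k 0))).map
          (fun k => (k, d1.getD k 0)) :=
    items_foldl_cond_insert d1.keys _ _ _ hnd1 (fun k _ _ => PySem.Dict.contains_empty k)
  have hA2 : (d2.keys.foldl (fun acc k =>
        if !(d1.contains k) then acc.insert k (d2.getD k 0) else acc)
        (d1.keys.foldl (fun acc k =>
          if !(d2.contains k) || !(d1.getD k 0 == d2.getD k 0) then acc.insert k (d1.getD k 0) else acc)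
          PySem.Dict.empty)).items
      = (d1.keys.foldl (fun acc k =>
          if !(d2.contains k) || !(d1.getD k 0 == d2.getD k 0) then acc.insert k (d1.getD k 0) else acc)
          PySem.Dict.empty).items
        ++ (d2.keys.filter (fun k => !(d1.contains k))).map (fun k => (k, d2.getD k 0)) := by
    refine items_foldl_cond_insert d2.keys _ _ _ hnd2 ?_
    intro k _ hck
    have hk1 : k ∉ d1.keys := by
      intro hmem
      have : d1.contains k = true := by
        rw [PySem.Dict.contains_eq_decide_mem_keys]; exact decide_eq_true hmem
      simp [this] at hck
    exact contains_foldl_cond_insert d1.keys _ _ PySem.Dict.empty k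
      (PySem.Dict.contains_empty k) hk1
  -- ---- B's side: the triple merge is dict1's items followed by dict2-only items ----
  have hm1 : PySem.Dict.ofList d1.items = d1 := by
    apply PySem.Dict.ext
    show ((PySem.Dict.update PySem.Dict.empty d1.items)).items = d1.items
    unfold PySem.Dict.update
    rw [PySem.Dict.items_foldl_insert_fresh _ Prod.fst Prod.snd PySem.Dict.empty
          (fun a _ => PySem.Dict.contains_empty a.1) hnd1']
    simp [PySem.Dict.empty]
  have hmerged : (PySem.Dict.ofList (d1.items ++ d2.items ++ d1.items)).items
      = d1.items ++ d2.items.filter (fun p => !(d1.contains p.1)) := by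
    show ((PySem.Dict.update PySem.Dict.empty (d1.items ++ d2.items ++ d1.items))).items = _
    unfold PySem.Dict.update
    rw [List.foldl_append, List.foldl_append]
    have e1 : d1.items.foldl (fun d p => d.insert p.1 p.2) PySem.Dict.empty = d1 := hm1
    rw [e1]
    set m2 : PySem.Dict String Int := d2.items.foldl (fun d p => d.insert p.1 p.2) d1 with hm2def
    have hm2 : m2.items = d1.items.map (fun p => match lk d2.items p.1 with | some v => (p.1, v) | none => p)
        ++ d2.items.filter (fun p => !(d1.contains p.1)) :=
      items_foldl_insert_lk d2.items d1 hnd2'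
    rw [items_foldl_insert_lk d1.items m2 hnd1']
    have hcont : ∀ p ∈ d1.items, m2.contains p.1 = true := by
      intro p hp
      have hfst : ∀ q : String × Int,
          ((match lk d2.items q.1 with | some v => (q.1, v) | none => q) : String × Int).1 = q.1 := by
        intro q; rcases lk d2.items q.1 <;> rfl
      have hmem : p.1 ∈ m2.keys := by
        simp only [PySem.Dict.keys, hm2, List.map_append, List.map_map, List.mem_append]
        left
        exact List.mem_map.mpr ⟨p, hp, hfst p⟩
      rw [PySem.Dict.contains_eq_decide_mem_keys]
      exact decide_eq_true hmem
    have hflt : d1.items.filter (fun p => !(m2.contains p.1)) = [] := by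
      apply List.filter_eq_nil_iff.mpr
      intro p hp
      simp [hcont p hp]
    rw [hflt, hm2, List.append_nil, List.map_append, List.map_map]
    congr 1
    · -- re-inserting dict1's items restores dict1's pairs in place
      have : ∀ p ∈ d1.items,
          ((fun p : String × Int => match lk d1.items p.1 with | some v => (p.1, v) | none => p) ∘
            (fun p : String × Int => match lk d2.items p.1 with | some v => (p.1, v) | none => p)) p = p := by
        intro p hp
        have hlk1 : lk d1.items p.1 = some p.2 := lk_of_mem d1.items p.1 p.2 hnd1' hp
        rcases h2 : lk d2.items p.1 with _ | w <;> simp [Function.comp, h2, hlk1]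
      calc d1.items.map _ = d1.items.map id := List.map_congr_left this
        _ = _ := by simp
    · -- dict2-only pairs are untouched by the third pass
      refine (List.map_congr_left ?_).trans (List.map_id _)
      intro p hp
      have hpc := List.of_mem_filter hp
      have hnm : p.1 ∉ d1.items.map Prod.fst := by
        intro hmem
        rcases List.mem_map.mp hmem with ⟨q, hq, hqe⟩
        have := contains_of_mem_items d1 q hq
        rw [hqe] at this
        simp [this] at hpc
      simp [lk_eq_none d1.items p.1 hnm]
  -- ---- B's filter on the merged items equals A's two filtered groups ----
  have hchanged : d1.items.filter (fun p => !(d1.get? p.1 == d2.get? p.1))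
      = (d1.keys.filter (fun k => !(d2.contains k) || !(d1.getD k 0 == d2.getD k 0))).map
          (fun k => (k, d1.getD k 0)) := by
    rw [PySem.Dict.items_eq_map_keys d1 hnd1 0, List.filter_map]
    congr 1
    apply List.filter_congr
    intro k hk
    simp only [Function.comp]
    have hc1 : d1.contains k = true := by
      rw [PySem.Dict.contains_eq_decide_mem_keys]; exact decide_eq_true hk
    have hsome : d1.get? k = some (d1.getD k 0) := by
      rcases h : d1.get? k with _ | v
      · rw [PySem.Dict.contains_eq_isSome_get?, h] at hc1; simp at hc1
      · rw [PySem.Dict.getD_eq_get?_getD, h]; rfl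
    rcases h2 : d2.get? k with _ | w
    · have hc2 : d2.contains k = false := by
        rw [PySem.Dict.contains_eq_isSome_get?, h2]; rfl
      simp [hsome, hc2]
    · have hc2 : d2.contains k = true := by
        rw [PySem.Dict.contains_eq_isSome_get?, h2]; rfl
      have hg2 : d2.getD k 0 = w := by rw [PySem.Dict.getD_eq_get?_getD, h2]; rfl
      simp [hsome, hc2, hg2]
  have hkeep : (d2.items.filter (fun p => !(d1.contains p.1))).filter
        (fun p => !(d1.get? p.1 == d2.get? p.1))
      = d2.items.filter (fun p => !(d1.contains p.1)) := by
    apply List.filter_eq_self.mpr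
    intro p hp
    have hpc := List.of_mem_filter hp
    have h1 : d1.get? p.1 = none := by
      rcases h : d1.get? p.1 with _ | v
      · rfl
      · have : d1.contains p.1 = true := by
          rw [PySem.Dict.contains_eq_isSome_get?, h]; rfl
        simp [this] at hpc
    have h2 : d2.get? p.1 = some p.2 :=
      PySem.Dict.get?_of_mem_items d2 (List.mem_of_mem_filter hp) hnd2
    simp [h1, h2]
  have hadded : d2.items.filter (fun p => !(d1.contains p.1))
      = (d2.keys.filter (fun k => !(d1.contains k))).map (fun k => (k, d2.getD k 0)) := by
    rw [PySem.Dict.items_eq_map_keys d2 hnd2 0, List.filter_map]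
    rfl
  -- ---- the final dict over the concatenation keeps the list: its keys are distinct ----
  have hfinal : (PySem.Dict.ofList
        ((d1.keys.filter (fun k => !(d2.contains k) || !(d1.getD k 0 == d2.getD k 0))).map
            (fun k => (k, d1.getD k 0))
          ++ (d2.keys.filter (fun k => !(d1.contains k))).map (fun k => (k, d2.getD k 0)))).items
      = (d1.keys.filter (fun k => !(d2.contains k) || !(d1.getD k 0 == d2.getD k 0))).map
            (fun k => (k, d1.getD k 0))
          ++ (d2.keys.filter (fun k => !(d1.contains k))).map (fun k => (k, d2.getD k 0)) := by
    have hnodup : ((((d1.keys.filter (fun k => !(d2.contains k) || !(d1.getD k 0 == d2.getD k 0))).map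
            (fun k => (k, d1.getD k 0))
          ++ (d2.keys.filter (fun k => !(d1.contains k))).map (fun k => (k, d2.getD k 0)))).map
            Prod.fst).Nodup := by
      rw [List.map_append, List.map_map, List.map_map]
      have e1 : (d1.keys.filter (fun k => !(d2.contains k) || !(d1.getD k 0 == d2.getD k 0))).map
            (Prod.fst ∘ fun k => (k, d1.getD k 0))
          = d1.keys.filter (fun k => !(d2.contains k) || !(d1.getD k 0 == d2.getD k 0)) := by
        simp [Function.comp_def]
      have e2 : (d2.keys.filter (fun k => !(d1.contains k))).map (Prod.fst ∘ fun k => (k, d2.getD k 0))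
          = d2.keys.filter (fun k => !(d1.contains k)) := by
        simp [Function.comp_def]
      rw [e1, e2]
      refine List.Nodup.append (hnd1.filter _) (hnd2.filter _) ?_
      intro k hk1 hk2
      have hmem1 : k ∈ d1.keys := List.mem_of_mem_filter hk1
      have hck := List.of_mem_filter hk2
      have : d1.contains k = true := by
        rw [PySem.Dict.contains_eq_decide_mem_keys]; exact decide_eq_true hmem1
      simp [this] at hck
    show (PySem.Dict.update PySem.Dict.empty _).items = _
    unfold PySem.Dict.update
    rw [PySem.Dict.items_foldl_insert_fresh _ Prod.fst Prod.snd PySem.Dict.empty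
          (fun a _ => PySem.Dict.contains_empty a.1) hnodup]
    simp [PySem.Dict.empty, Function.comp_def]
  rw [hA2, hA1, hmerged, List.filter_append, hchanged, hkeep, hadded, hfinal]
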